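-- pv_equiv track=rewrite | github.com/flynnbr11/QMLA | Libraries/QML_lib_backup_nov_28/ModelGeneration.py | ising_fully_interacting
-- ===== SOURCE A (Python) =====
-- def interaction_ham(qubit_list, operator_list, num_qubits):
--
--     t_str = ''
--     running_str = ''
--     for i in range(num_qubits):
--         t_str += 'T'
--
--         if i in qubit_list:
--             running_str += operator_list[qubit_list.index(i)]
--
--         else:
--             running_str += 'i'
--         if len(t_str)!=num_qubits:
--             running_str += t_str
--     return running_str
--
-- def ising_fully_interacting(num_qubits):
--     # fully interacting Ising Hamiltonian name
--     this_idx = 0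
--     max_idx = 0
--     for i in range(num_qubits):
--         max_idx += i ## Triangle number of
--     p_str = ''
--     for a in range(num_qubits):
--         p_str += 'P'
--
--     running_str=''
--     for i in range(num_qubits):
--         for j in range(i, num_qubits):
--             if i!=j:
--                 this_idx+=1
--                 op_list = ['z', 'z']
--                 qub_list = [i,j]
--                 new_term = interaction_ham(qubit_list=qub_list, operator_list=op_list, num_qubits=num_qubits)
--                 running_str += new_term
--                 if(this_idx < max_idx):
--                     running_str += p_str
--     return running_str
-- ===== SOURCE B (Python) =====
-- def ising_fully_interacting(num_qubits):
--     # fully interacting Ising Hamiltonian name: table-first, join-based assembly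
--     n = num_qubits
--     seps = ['T' * (k + 1) for k in range(n - 1)] + ['']
--     terms = []
--     for i in range(n):
--         for j in range(i + 1, n):
--             ops = ['i'] * n
--             ops[i] = 'z'
--             ops[j] = 'z'
--             terms.append(''.join(op + sep for op, sep in zip(ops, seps)))
--     return ('P' * n).join(terms)
-- ===== Notes on version B (the rewrite author's own statement) =====
-- stated objective: simpler
-- what changed: Replaces the helper that re-scans each position with a membership test, list.index lookup and a running 'T' accumulator, and the running-index 'this_idx < max_idx' separator logic, by a table-first assembly: a separator table and an op table built up front, each term formed by zipping ops with separators, and the terms joined with ('P'*n).join.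
import Mathlib
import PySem

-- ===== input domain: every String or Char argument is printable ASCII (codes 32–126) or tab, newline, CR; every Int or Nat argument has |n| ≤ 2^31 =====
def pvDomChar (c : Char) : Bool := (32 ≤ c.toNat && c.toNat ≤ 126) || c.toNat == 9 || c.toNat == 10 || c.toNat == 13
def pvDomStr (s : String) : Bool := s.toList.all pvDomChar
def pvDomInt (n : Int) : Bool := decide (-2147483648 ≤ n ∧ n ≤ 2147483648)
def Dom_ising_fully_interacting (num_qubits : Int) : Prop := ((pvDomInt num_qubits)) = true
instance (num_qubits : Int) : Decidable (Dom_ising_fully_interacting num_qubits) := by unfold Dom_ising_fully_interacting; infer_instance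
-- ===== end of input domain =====

-- B replaces A's membership-test/running-index term construction by a table-first, join-based assembly (objective: simpler); equal return value proved for all inputs.


-- ===== PORT A =====
-- Port of A. Strings are built as List Char (PySem.Chars level) and packed with String.ofList at the end.
def interaction_ham (qubit_list : List Int) (operator_list : List (List Char)) (num_qubits : Int) :
    List Char :=
  ((PySem.List.pyRange 0 num_qubits 1).foldl
    (fun (st : List Char × List Char) i =>
      let t := st.1 ++ ['T']
      let r := st.2 ++ (if i ∈ qubit_list then
                          PySem.List.pyGetD operator_list
                            ((((PySem.List.index? qubit_list i).getD 0 : Nat) : Int)) []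
                        else ['i'])
      let r := if (t.length : Int) ≠ num_qubits then r ++ t else r
      (t, r)) (([] : List Char), ([] : List Char))).2

def ising_fully_interacting (num_qubits : Int) : String :=
  let max_idx := (PySem.List.pyRange 0 num_qubits 1).foldl (fun m i => m + i) (0 : Int)
  let p_str := (PySem.List.pyRange 0 num_qubits 1).foldl (fun s _ => s ++ ['P']) ([] : List Char)
  let st := (PySem.List.pyRange 0 num_qubits 1).foldl
    (fun (st : Int × List Char) i =>
      (PySem.List.pyRange i num_qubits 1).foldl
        (fun (st : Int × List Char) j =>
          if i ≠ j then
            let this_idx := st.1 + 1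
            let new_term := interaction_ham [i, j] [['z'], ['z']] num_qubits
            let r := st.2 ++ new_term
            let r := if this_idx < max_idx then r ++ p_str else r
            (this_idx, r)
          else st) st)
    ((0 : Int), ([] : List Char))
  String.ofList st.2

-- ===== PORT B =====
-- Port of B: one term from the op table and the precomputed separator table, zipped and joined.
def altTerm (seps : List (List Char)) (num_qubits i j : Int) : List Char :=
  let ops := ((List.replicate num_qubits.toNat (['i'] : List Char)).set i.toNat ['z']).set
      j.toNat ['z']
  ((ops.zip seps).map (fun os => os.1 ++ os.2)).flatten

def ising_fully_interacting_alt (num_qubits : Int) : String :=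
  let seps := ((PySem.List.pyRange 0 (num_qubits - 1) 1).map
      (fun k => List.replicate (k + 1).toNat 'T')) ++ [[]]
  let terms := (PySem.List.pyRange 0 num_qubits 1).flatMap (fun i =>
      (PySem.List.pyRange (i + 1) num_qubits 1).map (fun j => altTerm seps num_qubits i j))
  String.ofList ((terms.intersperse (List.replicate num_qubits.toNat 'P')).flatten)

-- ===== PRECONDITION & SPEC =====
def Spec_ising_fully_interacting (num_qubits : Int) (out : String) : Prop := out = ising_fully_interacting_alt num_qubits
instance (num_qubits : Int) (out : String) : Decidable (Spec_ising_fully_interacting num_qubits out) := by unfold Spec_ising_fully_interacting; infer_instance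

-- ===== CLAIM (what is proved, stated in full; the proofs are below) =====
def Claim_equal_ising_fully_interacting : Prop := ∀ (num_qubits : Int), Dom_ising_fully_interacting num_qubits → Spec_ising_fully_interacting num_qubits (ising_fully_interacting num_qubits)

-- ===== LEMMAS AND PROOFS =====

-- canonical form of one (i,j) term over m qubits
def termC (m : Nat) (i j : Int) : List Char :=
  (List.range m).flatMap (fun (k : Nat) =>
    (if (k : Int) = i ∨ (k : Int) = j then ['z'] else ['i']) ++
    (if k + 1 = m then [] else List.replicate (k + 1) 'T'))

theorem foldl_appendP (l : List Int) (acc : List Char) :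
    l.foldl (fun s _ => s ++ ['P']) acc = acc ++ List.replicate l.length 'P' := by
  induction l generalizing acc with
  | nil => simp
  | cons x xs ih => simp [ih, List.replicate_succ]

theorem bridge (n : Nat) (f : Nat → Nat) :
    ((List.range n).map f).sum = ∑ k ∈ Finset.range n, f k := by
  exact (Nat.add_zero _).symm

theorem listsum_reflect (n : Nat) :
    ((List.range n).map (fun k => n - 1 - k)).sum = (List.range n).sum := by
  rw [bridge, Finset.sum_range_reflect (fun k => k) n]
  have := (bridge n (fun k => k)).symm
  simpa using this

-- generic "append each term, then the separator unless it is the last" fold = intersperse-join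
theorem join_fold (p : List Char) :
    ∀ (ts : List (List Char)) (c : Int) (r : List Char),
    (ts.foldl (fun (st : Int × List Char) t =>
        (st.1 + 1, st.2 ++ t ++ (if st.1 + 1 < c + ts.length then p else []))) (c, r)).2
      = r ++ (ts.intersperse p).flatten := by
  intro ts
  induction ts with
  | nil => intro c r; simp
  | cons t rest ih =>
    intro c r
    simp only [List.foldl_cons]
    cases rest with
    | nil => simp
    | cons u us =>
      have hlen : c + (((t :: u :: us : List (List Char)).length : Nat) : Int)
          = (c + 1) + (((u :: us : List (List Char)).length : Nat) : Int) := by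
        simp; ring
      simp only [hlen]
      have hinit : ((c : Int), r).1 + 1 < (c + 1) + (((u :: us : List (List Char)).length : Nat) : Int) := by
        change c + 1 < _
        have : (0:Int) ≤ ((us.length : Nat) : Int) := Int.natCast_nonneg _
        simp only [List.length_cons]
        push_cast

        omega
      rw [if_pos hinit]
      rw [ih (c + 1) (r ++ t ++ p)]
      simp [List.intersperse]

-- A's term equals the canonical term
theorem termA_eq (m : Nat) (i j : Int) (_hi : 0 ≤ i) (_hij : i < j) (_hj : j < (m : Int)) :
    interaction_ham [i, j] [['z'], ['z']] (m : Int) = termC m i j := by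
  have hop : ∀ M : Nat,
      (if (M : Int) ∈ ([i, j] : List Int) then
          PySem.List.pyGetD [['z'], ['z']]
            ((((PySem.List.index? ([i, j] : List Int) (M : Int)).getD 0 : Nat) : Int)) []
        else ['i'])
      = (if (M : Int) = i ∨ (M : Int) = j then ['z'] else ['i']) := by
    intro M
    by_cases hMi : (M : Int) = i
    · have : (i : Int) = (M : Int) := hMi.symm
      rw [if_pos (by simp [hMi]), if_pos (Or.inl hMi)]
      rw [show PySem.List.index? ([i, j] : List Int) (M : Int) = some 0 from by
        rw [← hMi]; exact PySem.List.index?_cons_self (M : Int) [j]]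
      rfl
    · by_cases hMj : (M : Int) = j
      · rw [if_pos (by simp [hMj]), if_pos (Or.inr hMj)]
        rw [show PySem.List.index? ([i, j] : List Int) (M : Int) = some 1 from by
          rw [PySem.List.index?_cons_of_ne _ (fun h => hMi h.symm)]
          rw [← hMj, PySem.List.index?_cons_self (M : Int) []]
          rfl]
        rfl
      · rw [if_neg (by simp [hMi, hMj]), if_neg (by tauto)]
  have key : ∀ M : Nat, M ≤ m →
      ((List.range M).map (fun (k : Nat) => (k : Int))).foldl
        (fun (st : List Char × List Char) x =>
          let t := st.1 ++ ['T']
          let r := st.2 ++ (if x ∈ ([i, j] : List Int) then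
                      PySem.List.pyGetD [['z'], ['z']]
                        ((((PySem.List.index? ([i, j] : List Int) x).getD 0 : Nat) : Int)) []
                    else ['i'])
          let r := if (t.length : Int) ≠ (m : Int) then r ++ t else r
          (t, r)) (([] : List Char), ([] : List Char))
      = (List.replicate M 'T',
         (List.range M).flatMap (fun (k : Nat) =>
           (if (k : Int) = i ∨ (k : Int) = j then ['z'] else ['i']) ++
           (if k + 1 = m then [] else List.replicate (k + 1) 'T'))) := by
    intro M
    induction M with
    | zero => intro _; simp
    | succ M ih =>
      intro hM
      rw [List.range_succ, List.map_append, List.foldl_append, ih (by omega)]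
      simp only [List.map_cons, List.map_nil, List.foldl_cons, List.foldl_nil]
      rw [List.flatMap_append]
      have hrep : List.replicate M 'T' ++ ['T'] = List.replicate (M + 1) 'T' := by
        rw [List.replicate_succ']
      refine Prod.ext ?_ ?_
      · simpa using hrep
      · simp only [hop M]
        by_cases hMm : M + 1 = m
        · rw [if_neg (by simp [hMm])]
          simp [hMm]
        · rw [if_pos (by
            simp only [List.length_append, List.length_replicate, List.length_cons,
              List.length_nil]
            push_cast
            omega)]
          simp [hMm, ← hrep, List.append_assoc]
  have h := congrArg Prod.snd (key m le_rfl)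
  unfold interaction_ham
  rw [PySem.List.pyRange_zero_natCast]
  exact h

-- B's term equals the canonical term
theorem termB_eq (m : Nat) (i j : Int) (hi : 0 ≤ i) (hij : i < j) (hj : j < (m : Int)) :
    altTerm (((PySem.List.pyRange 0 ((m : Int) - 1) 1).map
        (fun k => List.replicate (k + 1).toNat 'T')) ++ [[]]) (m : Int) i j = termC m i j := by
  have hj' : 0 ≤ j := le_of_lt (lt_of_le_of_lt hi hij)
  obtain ⟨m', rfl⟩ : ∃ m', m = m' + 1 := ⟨m - 1, by omega⟩
  have hseps : ((PySem.List.pyRange 0 (((m' + 1 : Nat) : Int) - 1) 1).map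
        (fun k => List.replicate (k + 1).toNat 'T')) ++ [[]]
      = (List.range (m' + 1)).map
          (fun k => if k + 1 = m' + 1 then [] else List.replicate (k + 1) 'T') := by
    rw [show ((m' + 1 : Nat) : Int) - 1 = ((m' : Nat) : Int) by push_cast; ring,
      PySem.List.pyRange_zero_natCast, List.map_map, List.range_succ, List.map_append]
    congr 1
    · apply List.map_congr_left
      intro k hk
      have hk' := List.mem_range.mp hk
      simp only [Function.comp_def]
      rw [if_neg (by omega), show ((k : Int) + 1).toNat = k + 1 from by omega]
    · simp
  have hops : ((List.replicate (m' + 1) (['i'] : List Char)).set i.toNat ['z']).set j.toNat ['z']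
      = (List.range (m' + 1)).map
          (fun (k : Nat) => if (k : Int) = i ∨ (k : Int) = j then ['z'] else ['i']) := by
    apply List.ext_getElem
    · simp
    · intro k h1 h2
      have hk : k < m' + 1 := by simpa using h2
      rw [List.getElem_set, List.getElem_set, List.getElem_map, List.getElem_range,
        List.getElem_replicate]
      have e1 : (j.toNat = k) = ((k : Int) = j) := by
        simp only [eq_iff_iff]; omega
      have e2 : (i.toNat = k) = ((k : Int) = i) := by
        simp only [eq_iff_iff]; omega
      simp only [e1, e2]
      by_cases hkj : (k : Int) = j
      · simp [hkj]
      · by_cases hki : (k : Int) = i <;> simp [hki, hkj]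
  simp only [altTerm, termC]
  rw [show (((m' + 1 : Nat) : Int)).toNat = m' + 1 from by omega]
  rw [hseps, hops, List.zip_map', List.map_map, List.flatMap_def]
  rfl

-- max_idx equals the number of emitted pairs
theorem max_idx_eq_pairs (m : Nat) :
    (PySem.List.pyRange 0 (m : Int) 1).foldl (fun a i => a + i) (0 : Int)
      = (((PySem.List.pyRange 0 (m : Int) 1).flatMap (fun i =>
          (PySem.List.pyRange (i + 1) (m : Int) 1).map
            (fun j => interaction_ham [i, j] [['z'], ['z']] (m : Int)))).length : Int) := by
  rw [PySem.List.foldl_add _ (fun i => i) 0, PySem.List.pyRange_zero_natCast]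
  rw [List.length_flatMap]
  simp only [List.map_map, Function.comp_def, List.length_map, PySem.List.length_pyRange_one]
  have hcong : (List.range m).map (fun k : Nat => ((m : Int) - ((k : Int) + 1)).toNat)
      = (List.range m).map (fun k : Nat => m - 1 - k) := by
    apply List.map_congr_left
    intro k hk
    have := List.mem_range.mp hk
    omega
  rw [hcong, listsum_reflect m]
  simp [Nat.cast_list_sum]

theorem skip_map_fold (n max_idx : Int) (p : List Char) (i : Int) :
    ∀ (l : List Int) (st : Int × List Char), (∀ j ∈ l, i ≠ j) →
    l.foldl
        (fun (st : Int × List Char) j =>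
          if i ≠ j then
            (st.1 + 1, (if st.1 + 1 < max_idx
              then st.2 ++ interaction_ham [i, j] [['z'], ['z']] n ++ p
              else st.2 ++ interaction_ham [i, j] [['z'], ['z']] n))
          else st) st
      = (l.map (fun j => interaction_ham [i, j] [['z'], ['z']] n)).foldl
          (fun (st : Int × List Char) t =>
            (st.1 + 1, st.2 ++ t ++ (if st.1 + 1 < max_idx then p else []))) st := by
  intro l
  induction l with
  | nil => intro st _; simp
  | cons j js ihl =>
    intro st hmem
    have hij : i ≠ j := hmem j (by simp)
    simp only [List.foldl_cons, List.map_cons, if_pos hij]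
    rw [ihl _ (fun j hj => hmem j (by simp [hj]))]
    congr 1
    by_cases hlt : st.1 + 1 < max_idx <;> simp [hlt]

-- the skip-the-diagonal inner loop is a fold over the j > i terms
theorem inner_fold (n : Int) (max_idx : Int) (p : List Char) (i : Int) (hi : i < n)
    (st : Int × List Char) :
    (PySem.List.pyRange i n 1).foldl
        (fun (st : Int × List Char) j =>
          if i ≠ j then
            (st.1 + 1, (if st.1 + 1 < max_idx
              then st.2 ++ interaction_ham [i, j] [['z'], ['z']] n ++ p
              else st.2 ++ interaction_ham [i, j] [['z'], ['z']] n))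
          else st) st
      = ((PySem.List.pyRange (i + 1) n 1).map (fun j => interaction_ham [i, j] [['z'], ['z']] n)).foldl
          (fun (st : Int × List Char) t =>
            (st.1 + 1, st.2 ++ t ++ (if st.1 + 1 < max_idx then p else []))) st := by
  rw [PySem.List.pyRange_one_cons hi]
  rw [List.foldl_cons, if_neg (by simp)]
  exact skip_map_fold n max_idx p i _ st (fun j hj => by
    have := (PySem.List.mem_pyRange_one.mp hj).1
    omega)

-- ===== VERDICT (by name: the statement is the Claim_ definition above) =====
theorem ising_fully_interacting_spec : Claim_equal_ising_fully_interacting := by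
  intro n _hdom
  unfold Spec_ising_fully_interacting
  by_cases hn : n ≤ 0
  · have h0 : PySem.List.pyRange 0 n 1 = [] := PySem.List.pyRange_one_eq_nil (by omega)
    have h1 : PySem.List.pyRange 0 (n - 1) 1 = [] := PySem.List.pyRange_one_eq_nil (by omega)
    simp [ising_fully_interacting, ising_fully_interacting_alt, h0, h1]
  · obtain ⟨m, rfl⟩ : ∃ m : Nat, n = (m : Int) := ⟨n.toNat, by omega⟩
    simp only [ising_fully_interacting, ising_fully_interacting_alt]
    -- the fixed separator block
    have hp : (PySem.List.pyRange 0 (m : Int) 1).foldl (fun s _ => s ++ ['P']) ([] : List Char)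
        = List.replicate ((m : Int)).toNat 'P' := by
      rw [foldl_appendP]
      simp [PySem.List.length_pyRange_one]
    set p : List Char := List.replicate ((m : Int)).toNat 'P' with hpdef
    set seps : List (List Char) := ((PySem.List.pyRange 0 ((m : Int) - 1) 1).map
        (fun k => List.replicate (k + 1).toNat 'T')) ++ [[]] with hsepsdef
    set tl : List (List Char) := (PySem.List.pyRange 0 (m : Int) 1).flatMap (fun i =>
        (PySem.List.pyRange (i + 1) (m : Int) 1).map
          (fun j => interaction_ham [i, j] [['z'], ['z']] (m : Int))) with htldef
    -- the two term lists coincide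
    have hterms : tl = (PySem.List.pyRange 0 (m : Int) 1).flatMap (fun i =>
        (PySem.List.pyRange (i + 1) (m : Int) 1).map
          (fun j => altTerm seps (m : Int) i j)) := by
      rw [htldef, List.flatMap_def, List.flatMap_def]
      congr 1
      apply List.map_congr_left
      intro i hi
      have hib := PySem.List.mem_pyRange_one.mp hi
      apply List.map_congr_left
      intro j hj
      have hjb := PySem.List.mem_pyRange_one.mp hj
      rw [termA_eq m i j (by omega) (by omega) (by omega),
        termB_eq m i j (by omega) (by omega) (by omega)]
    -- max_idx counts exactly the emitted terms
    have hmax : (PySem.List.pyRange 0 (m : Int) 1).foldl (fun a i => a + i) (0 : Int)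
        = 0 + (tl.length : Int) := by
      rw [max_idx_eq_pairs m, htldef]
      ring
    simp only [hp, hmax]
    -- the A-side double loop is the fold of the term list
    have hloop : (PySem.List.pyRange 0 (m : Int) 1).foldl
        (fun (st : Int × List Char) i =>
          (PySem.List.pyRange i (m : Int) 1).foldl
            (fun (st : Int × List Char) j =>
              if i ≠ j then
                (st.1 + 1, (if st.1 + 1 < 0 + (tl.length : Int)
                  then st.2 ++ interaction_ham [i, j] [['z'], ['z']] (m : Int) ++ p
                  else st.2 ++ interaction_ham [i, j] [['z'], ['z']] (m : Int)))
              else st) st) ((0 : Int), ([] : List Char))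
        = tl.foldl (fun (st : Int × List Char) t =>
            (st.1 + 1, st.2 ++ t ++ (if st.1 + 1 < 0 + (tl.length : Int) then p else [])))
            ((0 : Int), ([] : List Char)) := by
      rw [htldef, List.flatMap_def, List.foldl_flatten, List.foldl_map]
      apply PySem.List.foldl_congr_mem
      intro st i hi
      have hib := PySem.List.mem_pyRange_one.mp hi
      exact inner_fold (m : Int) (0 + (tl.length : Int)) p i (by omega) st
    rw [show (fun (st : Int × List Char) i =>
          (PySem.List.pyRange i (m : Int) 1).foldl
            (fun (st : Int × List Char) j =>
              if i ≠ j then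
                (st.1 + 1, (if st.1 + 1 < 0 + (tl.length : Int)
                  then st.2 ++ interaction_ham [i, j] [['z'], ['z']] (m : Int) ++ p
                  else st.2 ++ interaction_ham [i, j] [['z'], ['z']] (m : Int)))
              else st) st) = (fun (st : Int × List Char) i =>
          (PySem.List.pyRange i (m : Int) 1).foldl
            (fun (st : Int × List Char) j =>
              if i ≠ j then
                (st.1 + 1,
                  (if st.1 + 1 < 0 + (tl.length : Int)
                    then st.2 ++ interaction_ham [i, j] [['z'], ['z']] (m : Int) ++ p
                    else st.2 ++ interaction_ham [i, j] [['z'], ['z']] (m : Int)))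
              else st) st) from rfl]
    rw [hloop, join_fold p tl 0 []]
    rw [hterms]
    simp
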